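-- pv_equiv track=rewrite | github.com/mhso/AdventOfCode2023 | src/day_15.py | get_reach
-- ===== SOURCE A (Python) =====
-- def manhattan_dist(x_1, y_1, x_2, y_2):
--     return abs(x_2 - x_1) + abs(y_2 - y_1)
--
-- def get_reach(s_x, s_y, b_x, b_y, max_val):
--     dist = manhattan_dist(s_x, s_y, b_x, b_y) + 1
--     x_1 = s_x
--     x_2 = s_x
--     reach = set()
--     for y in range(s_y - dist, s_y + dist+1):
--         if y == s_y:
--             x_1, x_2 = x_2, x_1
--
--         if 0 <= y <= max_val:
--             if 0 <= x_1 <= max_val: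
--                 reach.add((x_1, y))
--             if 0 <= x_2 <= max_val:
--                 reach.add((x_2, y))
--
--         x_1 -= 1
--         x_2 += 1
--
--     return reach
-- ===== SOURCE B (Python) =====
-- def get_reach(s_x, s_y, b_x, b_y, max_val):
--     # The reach boundary is the diamond |x - s_x| + |y - s_y| = dist.  Its four sides
--     # lie on the diagonals x + y = (s_x + s_y) +/- dist and x - y = (s_x - s_y) +/- dist.
--     # Each grid row inside the diamond crosses one falling and one rising diagonal:
--     # the upper pair above the sensor row, the lower pair at and below it.  Intersect
--     # the row with those two lines instead of stepping pointers, and clip the row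
--     # range to the grid up front.
--     dist = abs(b_x - s_x) + abs(b_y - s_y) + 1
--     fall, rise = s_x + s_y, s_x - s_y
--     reach = set()
--     for y in range(max(0, s_y - dist), min(max_val, s_y + dist) + 1):
--         if y < s_y:
--             xs = (fall - dist - y, rise + dist + y)
--         else:
--             xs = (fall + dist - y, rise - dist + y)
--         for x in xs:
--             if 0 <= x <= max_val:
--                 reach.add((x, y))
--     return reach
-- ===== Notes on version B (the rewrite author's own statement) =====
-- stated objective: alternative
-- what changed: Replaced the two running x-pointers with the mid-loop swap by closed-form intersections of each row with the diamond's falling and rising diagonal sides, and clipped the row range to [0, max_val] up front so out-of-grid rows and the per-row y-bound test disappear.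
import Mathlib
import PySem

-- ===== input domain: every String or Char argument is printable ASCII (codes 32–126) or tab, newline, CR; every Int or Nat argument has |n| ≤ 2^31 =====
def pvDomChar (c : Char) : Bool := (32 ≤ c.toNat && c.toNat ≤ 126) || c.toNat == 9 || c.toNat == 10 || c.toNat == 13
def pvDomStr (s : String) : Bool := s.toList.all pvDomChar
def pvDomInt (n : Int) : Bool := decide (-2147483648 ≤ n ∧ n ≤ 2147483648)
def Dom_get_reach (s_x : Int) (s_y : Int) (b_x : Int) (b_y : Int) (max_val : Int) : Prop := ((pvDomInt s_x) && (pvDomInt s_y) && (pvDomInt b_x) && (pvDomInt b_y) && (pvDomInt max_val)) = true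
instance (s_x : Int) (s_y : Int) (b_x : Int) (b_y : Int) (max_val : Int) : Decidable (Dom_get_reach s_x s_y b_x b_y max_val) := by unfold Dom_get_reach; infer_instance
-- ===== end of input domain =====

-- B replaces A's two running pointers and mid-loop swap by closed-form intersections of
-- each row with the diamond's diagonal sides, with the row range clipped to the grid
-- up front (objective: alternative).

-- ===== PORT A =====
def manhattan_dist (x_1 : Int) (y_1 : Int) (x_2 : Int) (y_2 : Int) : Int :=
  |x_2 - x_1| + |y_2 - y_1|

-- loop body of A, named for the proofs; state = (x_1, x_2, reach)
def pyBodyA (_s_x : Int) (s_y : Int) (max_val : Int)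
    (st : Int × Int × List (Int × Int)) (y : Int) : Int × Int × List (Int × Int) :=
  let st := if y = s_y then (st.2.1, st.1, st.2.2) else st
  let x_1 := st.1
  let x_2 := st.2.1
  let reach := st.2.2
  let reach :=
    if 0 ≤ y ∧ y ≤ max_val then
      let reach := if 0 ≤ x_1 ∧ x_1 ≤ max_val then PySem.Set.add reach (x_1, y) else reach
      if 0 ≤ x_2 ∧ x_2 ≤ max_val then PySem.Set.add reach (x_2, y) else reach
    else reach
  (x_1 - 1, x_2 + 1, reach)

def get_reach (s_x : Int) (s_y : Int) (b_x : Int) (b_y : Int) (max_val : Int) : List (Int × Int) :=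
  let dist := manhattan_dist s_x s_y b_x b_y + 1
  ((PySem.List.pyRange (s_y - dist) (s_y + dist + 1) 1).foldl
    (pyBodyA s_x s_y max_val) (s_x, s_x, PySem.Set.empty)).2.2

-- ===== PORT B =====
-- loop body of B, named for the proofs; state = reach only
def pyBodyB (s_x : Int) (s_y : Int) (max_val : Int) (dist : Int)
    (reach : List (Int × Int)) (y : Int) : List (Int × Int) :=
  let fall := s_x + s_y
  let rise := s_x - s_y
  let xs := if y < s_y then [fall - dist - y, rise + dist + y]
            else [fall + dist - y, rise - dist + y]
  xs.foldl (fun r x => if 0 ≤ x ∧ x ≤ max_val then PySem.Set.add r (x, y) else r) reach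

def get_reach_alt (s_x : Int) (s_y : Int) (b_x : Int) (b_y : Int) (max_val : Int) : List (Int × Int) :=
  let dist := |b_x - s_x| + |b_y - s_y| + 1
  (PySem.List.pyRange (max 0 (s_y - dist)) (min max_val (s_y + dist) + 1) 1).foldl
    (pyBodyB s_x s_y max_val dist) PySem.Set.empty

-- ===== PRECONDITION & SPEC =====
def Spec_get_reach (s_x : Int) (s_y : Int) (b_x : Int) (b_y : Int) (max_val : Int) (out : List (Int × Int)) : Prop := out = get_reach_alt s_x s_y b_x b_y max_val
instance (s_x : Int) (s_y : Int) (b_x : Int) (b_y : Int) (max_val : Int) (out : List (Int × Int)) : Decidable (Spec_get_reach s_x s_y b_x b_y max_val out) := by unfold Spec_get_reach; infer_instance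

-- ===== CLAIM (what is proved, stated in full; the proofs are below) =====
def Claim_equal_get_reach : Prop := ∀ (s_x : Int) (s_y : Int) (b_x : Int) (b_y : Int) (max_val : Int), Dom_get_reach s_x s_y b_x b_y max_val → Spec_get_reach s_x s_y b_x b_y max_val (get_reach s_x s_y b_x b_y max_val)

-- ===== LEMMAS AND PROOFS =====

-- B's body guarded by A's row-bound test (proof-only device)
def gBody (s_x : Int) (s_y : Int) (max_val : Int) (dist : Int)
    (reach : List (Int × Int)) (y : Int) : List (Int × Int) :=
  if 0 ≤ y ∧ y ≤ max_val then pyBodyB s_x s_y max_val dist reach y else reach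

-- Phase 2 of A's loop (rows at and below s_y after the swap): pointer state is closed-form
lemma foldA_post (s_x s_y max_val dist : Int) :
    ∀ (n : Nat) (t : Int) (r : List (Int × Int)), s_y < t → s_y + dist + 1 ≤ t + n →
      ((PySem.List.pyRange t (s_y + dist + 1) 1).foldl (pyBodyA s_x s_y max_val)
        (s_x + (dist - (t - s_y)), s_x - (dist - (t - s_y)), r)).2.2
      = (PySem.List.pyRange t (s_y + dist + 1) 1).foldl (gBody s_x s_y max_val dist) r := by
  intro n
  induction n with
  | zero =>
      intro t r h1 h2
      rw [PySem.List.pyRange_one_eq_nil (by omega)]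
      rfl
  | succ n ih =>
      intro t r h1 h2
      rcases lt_or_ge t (s_y + dist + 1) with h | h
      · rw [PySem.List.pyRange_one_cons h]
        simp only [List.foldl_cons]
        have hne : ¬ (t = s_y) := by omega
        have hnlt : ¬ (t < s_y) := by omega
        have hstep : pyBodyA s_x s_y max_val
            (s_x + (dist - (t - s_y)), s_x - (dist - (t - s_y)), r) t
            = (s_x + (dist - (t + 1 - s_y)), s_x - (dist - (t + 1 - s_y)),
               gBody s_x s_y max_val dist r t) := by
          simp only [pyBodyA, gBody, pyBodyB, if_neg hne, if_neg hnlt, List.foldl_cons,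
            List.foldl_nil]
          refine Prod.ext (by ring) (Prod.ext (by ring) ?_)
          have e1 : s_x + (dist - (t - s_y)) = s_x + s_y + dist - t := by ring
          have e2 : s_x - (dist - (t - s_y)) = s_x - s_y - dist + t := by ring
          rw [e1, e2]
        rw [hstep]
        exact ih (t + 1) _ (by omega) (by omega)
      · rw [PySem.List.pyRange_one_eq_nil (by omega)]
        rfl

-- Phase 1 of A's loop (rows up to s_y, including the swap row)
lemma foldA_pre (s_x s_y max_val dist : Int) :
    ∀ (n : Nat) (t : Int) (r : List (Int × Int)), s_y - dist ≤ t → t ≤ s_y → s_y + dist + 1 ≤ t + n →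
      ((PySem.List.pyRange t (s_y + dist + 1) 1).foldl (pyBodyA s_x s_y max_val)
        (s_x - (dist - (s_y - t)), s_x + (dist - (s_y - t)), r)).2.2
      = (PySem.List.pyRange t (s_y + dist + 1) 1).foldl (gBody s_x s_y max_val dist) r := by
  intro n
  induction n with
  | zero =>
      intro t r h0 h1 h2
      exact absurd h2 (by omega)
  | succ n ih =>
      intro t r h0 h1 h2
      have h : t < s_y + dist + 1 := by omega
      rw [PySem.List.pyRange_one_cons h]
      simp only [List.foldl_cons]
      by_cases ht : t = s_y
      · rw [ht]
        have hstep : pyBodyA s_x s_y max_val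
            (s_x - (dist - (s_y - s_y)), s_x + (dist - (s_y - s_y)), r) s_y
            = (s_x + (dist - (s_y + 1 - s_y)), s_x - (dist - (s_y + 1 - s_y)),
               gBody s_x s_y max_val dist r s_y) := by
          simp only [pyBodyA, gBody, pyBodyB, sub_self, sub_zero, ite_true,
            if_neg (lt_irrefl s_y), List.foldl_cons, List.foldl_nil]
          refine Prod.ext (by ring) (Prod.ext (by ring) ?_)
          have e1 : s_x + dist = s_x + s_y + dist - s_y := by ring
          have e2 : s_x - dist = s_x - s_y - dist + s_y := by ring
          rw [e1, e2]
        rw [hstep]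
        exact foldA_post s_x s_y max_val dist n (s_y + 1) _ (by omega) (by omega)
      · have hlt : t < s_y := by omega
        have hstep : pyBodyA s_x s_y max_val
            (s_x - (dist - (s_y - t)), s_x + (dist - (s_y - t)), r) t
            = (s_x - (dist - (s_y - (t + 1))), s_x + (dist - (s_y - (t + 1))),
               gBody s_x s_y max_val dist r t) := by
          simp only [pyBodyA, gBody, pyBodyB, if_neg ht, if_pos hlt, List.foldl_cons,
            List.foldl_nil]
          refine Prod.ext (by ring) (Prod.ext (by ring) ?_)
          have e1 : s_x - (dist - (s_y - t)) = s_x + s_y - dist - t := by ring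
          have e2 : s_x + (dist - (s_y - t)) = s_x - s_y + dist + t := by ring
          rw [e1, e2]
        rw [hstep]
        exact ih (t + 1) _ (by omega) (by omega) (by omega)

-- rows entirely out of [0, max_val] are no-ops for the guarded body
lemma fold_gBody_skip (s_x s_y max_val dist : Int) :
    ∀ (ys : List Int) (r : List (Int × Int)), (∀ y ∈ ys, y < 0 ∨ max_val < y) →
      ys.foldl (gBody s_x s_y max_val dist) r = r := by
  intro ys
  induction ys with
  | nil => intro r _; rfl
  | cons y ys ih =>
      intro r h
      have hy := h y (by simp)
      simp only [List.foldl_cons]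
      rw [show gBody s_x s_y max_val dist r y = r by
        unfold gBody; rw [if_neg]; omega]
      exact ih r (fun z hz => h z (by simp [hz]))

-- on rows inside [0, max_val] the guard is true
lemma fold_gBody_agree (s_x s_y max_val dist : Int) :
    ∀ (ys : List Int) (r : List (Int × Int)), (∀ y ∈ ys, 0 ≤ y ∧ y ≤ max_val) →
      ys.foldl (gBody s_x s_y max_val dist) r = ys.foldl (pyBodyB s_x s_y max_val dist) r := by
  intro ys
  induction ys with
  | nil => intro r _; rfl
  | cons y ys ih =>
      intro r h
      have hy := h y (by simp)
      simp only [List.foldl_cons]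
      rw [show gBody s_x s_y max_val dist r y = pyBodyB s_x s_y max_val dist r y by
        unfold gBody; rw [if_pos hy]]
      exact ih _ (fun z hz => h z (by simp [hz]))

-- the guarded fold over the full range equals B's fold over the clipped range
lemma fold_gBody_clip (s_x s_y max_val dist : Int) :
    (PySem.List.pyRange (s_y - dist) (s_y + dist + 1) 1).foldl (gBody s_x s_y max_val dist) PySem.Set.empty
    = (PySem.List.pyRange (max 0 (s_y - dist)) (min max_val (s_y + dist) + 1) 1).foldl
        (pyBodyB s_x s_y max_val dist) PySem.Set.empty := by
  by_cases hcap : max 0 (s_y - dist) ≤ min max_val (s_y + dist)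
  · rw [PySem.List.pyRange_one_append (s_y - dist) (max 0 (s_y - dist)) (s_y + dist + 1)
        (by omega) (by omega),
      PySem.List.pyRange_one_append (max 0 (s_y - dist)) (min max_val (s_y + dist) + 1)
        (s_y + dist + 1) (by omega) (by omega),
      List.foldl_append, List.foldl_append,
      fold_gBody_skip s_x s_y max_val dist _ _ (by
        intro y hy
        have := (PySem.List.mem_pyRange_one).mp hy
        omega),
      fold_gBody_agree s_x s_y max_val dist _ _ (by
        intro y hy
        have := (PySem.List.mem_pyRange_one).mp hy
        omega),
      fold_gBody_skip s_x s_y max_val dist _ _ (by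
        intro y hy
        have := (PySem.List.mem_pyRange_one).mp hy
        omega)]
  · rw [PySem.List.pyRange_one_eq_nil (show min max_val (s_y + dist) + 1 ≤ max 0 (s_y - dist) by omega),
      fold_gBody_skip s_x s_y max_val dist _ _ (by
        intro y hy
        have := (PySem.List.mem_pyRange_one).mp hy
        omega)]
    rfl

-- ===== VERDICT (by name: the statement is the Claim_ definition above) =====
theorem get_reach_spec : Claim_equal_get_reach := by
  intro s_x s_y b_x b_y max_val _
  unfold Spec_get_reach
  simp only [get_reach, get_reach_alt, manhattan_dist]
  set D : Int := |b_x - s_x| + |b_y - s_y| + 1 with hD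
  have hd : 1 ≤ D := by
    have := abs_nonneg (b_x - s_x); have := abs_nonneg (b_y - s_y); omega
  have h1 := foldA_pre s_x s_y max_val D (2 * D + 1).toNat (s_y - D) PySem.Set.empty
    (by omega) (by omega) (by omega)
  simp only [show s_y - (s_y - D) = D by ring, sub_self, sub_zero, add_zero] at h1
  rw [h1, fold_gBody_clip s_x s_y max_val D]
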